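-- pv_equiv track=rewrite | github.com/S0okJu/BOJ | Inbox/Python/1551.py | calculate
-- ===== SOURCE A (Python) =====
-- def calculate(n, k, arr):
--     if n == 1:
--         return arr
--
--     for j in range(k):
--         calculated_arr = list()  # Fix the typo "calculated" instead of "caculated"
--         for i in range(n-1):
--             calculated_arr.append(arr[i+1] - arr[i])
--         arr = calculated_arr
--         n = n - 1
--
--     return arr  # Return arr instead of the possibly undefined calculated_arr
-- ===== SOURCE B (Python) =====
-- def calculate(n, k, arr):
--     # single-pass k-th finite difference via Pascal-built binomial weights
--     if n == 1:
--         return arr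
--     if k <= 0:
--         return arr
--     if n <= k:
--         return []
--     w = [1]
--     for _ in range(k):
--         w = [(w[j - 1] if j > 0 else 0) - (w[j] if j < len(w) else 0)
--              for j in range(len(w) + 1)]
--     return [sum(w[j] * arr[i + j] for j in range(k + 1)) for i in range(n - k)]
-- ===== Notes on version B (the rewrite author's own statement) =====
-- stated objective: alternative
-- what changed: Replaces the k successive differencing passes by a single windowed pass: Pascal-recurrence weights w[j] = (-1)^(k-j)*C(k,j) are built once and each output entry is one weighted sum over a (k+1)-wide window of the original array.
import Mathlib
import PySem

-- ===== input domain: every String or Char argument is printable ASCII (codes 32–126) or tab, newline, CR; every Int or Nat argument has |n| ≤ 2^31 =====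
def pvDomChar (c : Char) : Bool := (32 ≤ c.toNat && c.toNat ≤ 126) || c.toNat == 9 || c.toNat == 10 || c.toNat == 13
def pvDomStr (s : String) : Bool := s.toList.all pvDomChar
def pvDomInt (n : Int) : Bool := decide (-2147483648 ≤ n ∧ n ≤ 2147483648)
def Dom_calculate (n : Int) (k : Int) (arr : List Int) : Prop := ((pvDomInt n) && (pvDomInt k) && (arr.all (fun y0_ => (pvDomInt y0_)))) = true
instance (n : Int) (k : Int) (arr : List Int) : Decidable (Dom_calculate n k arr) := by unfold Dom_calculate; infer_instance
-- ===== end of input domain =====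

-- B computes the k-th finite difference in one windowed pass with Pascal-built binomial
-- weights instead of A's k successive differencing passes (objective: alternative).

-- ===== PORT A =====
-- arr[i+1]/arr[i] ported with pyGetD; on Pre_ all indices are in range, so this is exact there.
def calculate (n : Int) (k : Int) (arr : List Int) : List Int :=
  if n == 1 then arr
  else
    ((PySem.List.pyRange 0 k 1).foldl (fun (st : List Int × Int) _ =>
      let ca := (PySem.List.pyRange 0 (st.2 - 1) 1).foldl (fun acc i =>
        acc ++ [PySem.List.pyGetD st.1 (i + 1) 0 - PySem.List.pyGetD st.1 i 0]) []
      (ca, st.2 - 1)) (arr, n)).1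

-- ===== PORT B =====
def calculate_alt (n : Int) (k : Int) (arr : List Int) : List Int :=
  if n == 1 then arr
  else if k ≤ 0 then arr
  else if n ≤ k then []
  else
    let w := (PySem.List.pyRange 0 k 1).foldl (fun w _ =>
      (PySem.List.pyRange 0 ((w.length : Int) + 1) 1).map (fun j =>
        (if j > 0 then PySem.List.pyGetD w (j - 1) 0 else 0) -
        (if j < (w.length : Int) then PySem.List.pyGetD w j 0 else 0))) [1]
    (PySem.List.pyRange 0 (n - k) 1).map (fun i =>
      (PySem.List.pyRange 0 (k + 1) 1).foldl (fun s j =>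
        s + PySem.List.pyGetD w j 0 * PySem.List.pyGetD arr (i + j) 0) 0)

-- ===== PRECONDITION & SPEC =====
-- Pre_ excludes exactly the inputs where A raises IndexError: k ≥ 1 and 2 ≤ n but
-- arr has fewer than n elements (the first pass reads arr[0..n-1]).
def Pre_calculate (n : Int) (k : Int) (arr : List Int) : Prop :=
  k ≤ 0 ∨ n ≤ 1 ∨ n ≤ (arr.length : Int)
instance (n : Int) (k : Int) (arr : List Int) : Decidable (Pre_calculate n k arr) := by
  unfold Pre_calculate; infer_instance
def pvWitness_calculate : Int × Int × List Int := (4, 2, [1, 5, 2, 9])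

def Spec_calculate (n : Int) (k : Int) (arr : List Int) (out : List Int) : Prop := out = calculate_alt n k arr
instance (n : Int) (k : Int) (arr : List Int) (out : List Int) : Decidable (Spec_calculate n k arr out) := by unfold Spec_calculate; infer_instance

-- ===== CLAIM (what is proved, stated in full; the proofs are below) =====
def Claim_equal_calculate : Prop := ∀ (n : Int) (k : Int) (arr : List Int), Dom_calculate n k arr → Pre_calculate n k arr → Spec_calculate n k arr (calculate n k arr)

-- ===== LEMMAS AND PROOFS =====

-- weighted window sum: Σ_t w[t] * arr[i+t]
def wsum : List Int → List Int → ℕ → Int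
  | [], _, _ => 0
  | c :: w', arr, i => c * arr.getD i 0 + wsum w' arr (i + 1)

-- Pascal step: (pstep w)[j] = w[j-1] - w[j] (out of range = 0)
def pstep (w : List Int) : List Int :=
  List.zipWith (· - ·) (0 :: w) (w ++ [0])

def W : ℕ → List Int
  | 0 => [1]
  | j + 1 => pstep (W j)

-- A's loop body as a step function
def Astep (st : List Int × Int) : List Int × Int :=
  let ca := (PySem.List.pyRange 0 (st.2 - 1) 1).foldl (fun acc i =>
    acc ++ [PySem.List.pyGetD st.1 (i + 1) 0 - PySem.List.pyGetD st.1 i 0]) []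
  (ca, st.2 - 1)

-- B's weight-update body as a step function
def Bstep (w : List Int) : List Int :=
  (PySem.List.pyRange 0 ((w.length : Int) + 1) 1).map (fun j =>
    (if j > 0 then PySem.List.pyGetD w (j - 1) 0 else 0) -
    (if j < (w.length : Int) then PySem.List.pyGetD w j 0 else 0))

theorem foldl_const_iterate {α β : Type} (f : α → α) (l : List β) (a : α) :
    l.foldl (fun st _ => f st) a = f^[l.length] a := by
  induction l generalizing a with
  | nil => rfl
  | cons x t ih => simp [List.foldl_cons, ih, Function.iterate_succ_apply]

theorem wsum_append (u v : List Int) (arr : List Int) (i : ℕ) :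
    wsum (u ++ v) arr i = wsum u arr i + wsum v arr (i + u.length) := by
  induction u generalizing i with
  | nil => simp [wsum]
  | cons c u ih =>
    simp only [List.cons_append, wsum, ih, List.length_cons]
    rw [show i + 1 + u.length = i + (u.length + 1) by omega]
    ring

theorem wsum_zip_sub (u v : List Int) (h : u.length = v.length) (arr : List Int) (i : ℕ) :
    wsum (List.zipWith (· - ·) u v) arr i = wsum u arr i - wsum v arr i := by
  induction u generalizing v i with
  | nil => cases v with
    | nil => simp [wsum]
    | cons _ _ => simp at h
  | cons c u ih =>
    cases v with
    | nil => simp at h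
    | cons d v =>
      simp only [List.length_cons, Nat.succ.injEq] at h
      simp only [List.zipWith_cons_cons, wsum, ih v h]
      ring

theorem wsum_pstep (w : List Int) (arr : List Int) (i : ℕ) :
    wsum (pstep w) arr i = wsum w arr (i + 1) - wsum w arr i := by
  unfold pstep
  rw [wsum_zip_sub (0 :: w) (w ++ [0]) (by simp) arr i, wsum_append]
  simp [wsum]

theorem length_pstep (w : List Int) : (pstep w).length = w.length + 1 := by
  simp [pstep]

theorem length_W (j : ℕ) : (W j).length = j + 1 := by
  induction j with
  | zero => rfl
  | succ m ih => rw [show W (m + 1) = pstep (W m) from rfl, length_pstep, ih]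

theorem getD_map_range (f : ℕ → Int) (m i : ℕ) :
    ((List.range m).map f).getD i 0 = if i < m then f i else 0 := by
  split
  · rw [List.getD_eq_getElem ((List.range m).map f) 0 (by simpa)]
    simp
  · rw [List.getD_eq_default]
    simpa using by omega

-- A's inner pass on xs with bound m
theorem innerA_eq (xs : List Int) (m : Int) :
    (PySem.List.pyRange 0 (m - 1) 1).foldl (fun acc i =>
        acc ++ [PySem.List.pyGetD xs (i + 1) 0 - PySem.List.pyGetD xs i 0]) []
      = (List.range (m - 1).toNat).map (fun i => xs.getD (i + 1) 0 - xs.getD i 0) := by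
  rw [PySem.List.foldl_append_singleton_eq_map, PySem.List.pyRange_one, List.map_map,
    List.nil_append]
  rw [show (m - 1 - 0).toNat = (m - 1).toNat by omega]
  refine List.map_congr_left ?_
  intro t _
  simp only [Function.comp_apply, Int.zero_add]
  rw [show ((t : Int) + 1) = ((t + 1 : ℕ) : Int) by push_cast; ring]
  rw [PySem.List.pyGetD_natCast, PySem.List.pyGetD_natCast]

-- the A-loop invariant: after j ≥ 1 passes the state is the j-th difference window form
theorem Astep_iterate (arr : List Int) (n : Int) (j : ℕ) (hj : 1 ≤ j) :
    Astep^[j] (arr, n)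
      = ((List.range (n - j).toNat).map (fun i => wsum (W j) arr i), n - j) := by
  induction j with
  | zero => omega
  | succ m ih =>
    by_cases hm : 1 ≤ m
    · rw [Function.iterate_succ_apply', ih hm]
      unfold Astep
      simp only [Prod.mk.injEq]
      refine ⟨?_, by push_cast; ring⟩
      rw [innerA_eq]
      rw [show (n - (m : Int) - 1).toNat = (n - ((m + 1 : ℕ) : Int)).toNat by push_cast; omega]
      refine List.map_congr_left ?_
      intro t ht
      rw [List.mem_range] at ht
      have h2 : (n - ((m + 1 : ℕ) : Int)).toNat + 1 ≤ (n - (m : Int)).toNat := by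
        push_cast; push_cast at ht; omega
      rw [getD_map_range, getD_map_range, if_pos (by omega), if_pos (by omega)]
      rw [show W (m + 1) = pstep (W m) from rfl, wsum_pstep]
    · have hm0 : m = 0 := by omega
      subst hm0
      simp only [zero_add, Function.iterate_one]
      unfold Astep
      simp only [Prod.mk.injEq]
      refine ⟨?_, by push_cast; ring⟩
      rw [innerA_eq]
      rw [show (n - 1).toNat = (n - ((1 : ℕ) : Int)).toNat by push_cast; omega]
      refine List.map_congr_left ?_
      intro t _
      rw [show W 1 = pstep (W 0) from rfl, wsum_pstep]
      simp [W, wsum]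

-- characterisation of port A for n ≠ 1
theorem calculate_char (n k : Int) (arr : List Int) (hn : n ≠ 1) (hk : 1 ≤ k) :
    calculate n k arr = (List.range (n - k).toNat).map (fun i => wsum (W k.toNat) arr i) := by
  unfold calculate
  rw [if_neg (by simpa using hn)]
  change (List.foldl (fun (st : List Int × Int) (_ : Int) => Astep st) (arr, n)
    (PySem.List.pyRange 0 k 1)).1 = _
  rw [foldl_const_iterate Astep _ (arr, n), PySem.List.length_pyRange_one]
  rw [show (k - 0).toNat = k.toNat by omega]
  rw [Astep_iterate arr n _ (by omega)]
  rw [show (n - (k.toNat : Int)) = n - k by omega]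

-- B's weight step equals the Pascal step
theorem Bstep_eq_pstep (w : List Int) : Bstep w = pstep w := by
  unfold Bstep
  rw [PySem.List.pyRange_one, List.map_map]
  apply List.ext_getElem
  · simp only [List.length_map, List.length_range, length_pstep]
    omega
  · intro i h1 h2
    simp only [List.getElem_map, List.getElem_range, Function.comp_apply, Int.zero_add]
    have hi : i < w.length + 1 := by
      rw [length_pstep] at h2; exact h2
    unfold pstep
    rw [List.getElem_zipWith]
    rcases Nat.eq_zero_or_pos i with h0 | h0
    · subst h0
      simp only [List.getElem_cons_zero, Nat.cast_zero]
      rw [if_neg (by norm_num)]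
      cases w with
      | nil => simp
      | cons c w' =>
        rw [if_pos (by simp)]
        simp [PySem.List.pyGetD_zero_cons]
    · obtain ⟨t, rfl⟩ : ∃ t, i = t + 1 := ⟨i - 1, by omega⟩
      rw [List.getElem_cons_succ]
      rw [if_pos (by push_cast; omega)]
      have ht : t < w.length := by omega
      rw [show ((t + 1 : ℕ) : Int) - 1 = ((t : ℕ) : Int) by push_cast; ring]
      rw [PySem.List.pyGetD_natCast, List.getD_eq_getElem w 0 ht]
      by_cases hlt : t + 1 < w.length
      · rw [if_pos (by exact_mod_cast hlt), List.getElem_append_left hlt,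
          PySem.List.pyGetD_natCast, List.getD_eq_getElem w 0 hlt]
      · rw [if_neg (by push_cast; omega)]
        rw [List.getElem_append_right (by omega)]
        simp

theorem pstep_iterate_eq_W (m : ℕ) : pstep^[m] [1] = W m := by
  induction m with
  | zero => rfl
  | succ j ih => rw [Function.iterate_succ_apply', ih]; rfl

theorem foldl_add_eq_sum (g : Int → Int) (l : List Int) (s0 : Int) :
    l.foldl (fun s j => s + g j) s0 = s0 + (l.map g).sum := by
  induction l generalizing s0 with
  | nil => simp
  | cons x t ih => simp [List.foldl_cons, ih]; ring

theorem wsum_eq_sum (w : List Int) (arr : List Int) (i : ℕ) :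
    wsum w arr i = ((List.range w.length).map (fun u => w.getD u 0 * arr.getD (i + u) 0)).sum := by
  induction w generalizing i with
  | nil => simp [wsum]
  | cons c w' ih =>
    simp only [List.length_cons, List.range_succ_eq_map, List.map_cons, List.map_map,
      List.sum_cons, List.getD_cons_zero, Nat.add_zero, wsum]
    rw [ih (i + 1)]
    congr 1
    refine congrArg List.sum (List.map_congr_left ?_)
    intro u _
    simp only [Function.comp_apply, List.getD_cons_succ]
    rw [show i + (u + 1) = i + 1 + u by omega]

-- B's inner weighted sum over the window at position t
theorem innerB_eq (w arr : List Int) (k : Int) (t : ℕ) (hw : (w.length : Int) = k + 1) :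
    (PySem.List.pyRange 0 (k + 1) 1).foldl (fun s j =>
        s + PySem.List.pyGetD w j 0 * PySem.List.pyGetD arr (((t : ℕ) : Int) + j) 0) 0
      = wsum w arr t := by
  rw [foldl_add_eq_sum, PySem.List.pyRange_one, List.map_map, wsum_eq_sum]
  rw [show (k + 1 - 0).toNat = w.length by omega]
  rw [Int.zero_add]
  congr 1
  refine List.map_congr_left ?_
  intro u _
  simp only [Function.comp_apply, Int.zero_add]
  rw [show ((t : ℕ) : Int) + (u : ℕ) = ((t + u : ℕ) : Int) by push_cast; ring]
  rw [PySem.List.pyGetD_natCast, PySem.List.pyGetD_natCast]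

-- characterisation of port B in the main branch
theorem calculate_alt_char (n k : Int) (arr : List Int) (hn : n ≠ 1) (hk : 1 ≤ k)
    (hnk : k < n) :
    calculate_alt n k arr = (List.range (n - k).toNat).map (fun i => wsum (W k.toNat) arr i) := by
  unfold calculate_alt
  rw [if_neg (by simpa using hn), if_neg (by omega), if_neg (by omega)]
  change (fun w : List Int => (PySem.List.pyRange 0 (n - k) 1).map (fun i =>
      (PySem.List.pyRange 0 (k + 1) 1).foldl (fun s j =>
        s + PySem.List.pyGetD w j 0 * PySem.List.pyGetD arr (i + j) 0) 0))
    (List.foldl (fun (w : List Int) (_ : Int) => Bstep w) [1] (PySem.List.pyRange 0 k 1)) = _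
  rw [foldl_const_iterate Bstep _ [1], PySem.List.length_pyRange_one]
  rw [show (k - 0).toNat = k.toNat by omega]
  rw [show Bstep = pstep from funext Bstep_eq_pstep, pstep_iterate_eq_W]
  simp only []
  rw [PySem.List.pyRange_one 0 (n - k), List.map_map]
  rw [show (n - k - 0).toNat = (n - k).toNat by omega]
  refine List.map_congr_left ?_
  intro t _
  simp only [Function.comp_apply, Int.zero_add]
  exact innerB_eq (W k.toNat) arr k t (by rw [length_W]; push_cast; omega)

-- ===== VERDICT (by name: the statement is the Claim_ definition above) =====
theorem calculate_spec : Claim_equal_calculate := by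
  intro n k arr _ hpre
  unfold Spec_calculate
  by_cases hn : n = 1
  · subst hn
    unfold calculate calculate_alt
    simp
  · by_cases hk : k ≤ 0
    · unfold calculate calculate_alt
      rw [if_neg (by simpa using hn), if_neg (by simpa using hn), if_pos (by simpa using hk)]
      rw [PySem.List.pyRange_one_eq_nil (by omega)]
      rfl
    · by_cases hnk : n ≤ k
      · rw [calculate_char n k arr hn (by omega)]
        unfold calculate_alt
        rw [if_neg (by simpa using hn), if_neg (by simpa using hk), if_pos (by simpa using hnk)]
        rw [show (n - k).toNat = 0 by omega]
        rfl
      · rw [calculate_char n k arr hn (by omega),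
          calculate_alt_char n k arr hn (by omega) (by omega)]
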